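-- pv_equiv track=rewrite | github.com/Nichita111/LFA_labs | lab_5/grammar_cnf.py | _unit_closure
-- ===== SOURCE A (Python) =====
-- from typing import Dict, Iterable, List, Set, Tuple
--
-- def _unit_closure(start: str, productions: Dict[str, List[Tuple[str, ...]]], vn: Set[str]) -> Set[str]:
--     closure = set([start])
--     stack = [start]
--     while stack:
--         head = stack.pop()
--         for rhs in productions.get(head, []):
--             if len(rhs) == 1 and rhs[0] in vn and rhs[0] not in closure:
--                 closure.add(rhs[0])
--                 stack.append(rhs[0])
--     return closure
-- ===== SOURCE B (Python) =====
-- def _unit_closure(start, productions, vn):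
--     # Chaotic fixpoint iteration instead of a worklist: repeatedly sweep the
--     # whole current closure, adding unit-production successors, until one full
--     # sweep adds nothing.  Correct because the closure is the least fixpoint of
--     # the one-step successor operator, and discovery order is irrelevant to a set.
--     closure = {start}
--     changed = True
--     while changed:
--         changed = False
--         for head in list(closure):
--             for rhs in productions.get(head, []):
--                 if len(rhs) == 1 and rhs[0] in vn and rhs[0] not in closure:
--                     closure.add(rhs[0])
--                     changed = True
--     return closure
-- ===== Notes on version B (the rewrite author's own statement) =====
-- stated objective: alternative
-- what changed: B replaces A's explicit stack worklist (DFS) with a chaotic fixpoint iteration: it keeps only the growing closure set and repeatedly sweeps all of it, adding unit successors, until a full sweep adds nothing.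
import Mathlib
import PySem

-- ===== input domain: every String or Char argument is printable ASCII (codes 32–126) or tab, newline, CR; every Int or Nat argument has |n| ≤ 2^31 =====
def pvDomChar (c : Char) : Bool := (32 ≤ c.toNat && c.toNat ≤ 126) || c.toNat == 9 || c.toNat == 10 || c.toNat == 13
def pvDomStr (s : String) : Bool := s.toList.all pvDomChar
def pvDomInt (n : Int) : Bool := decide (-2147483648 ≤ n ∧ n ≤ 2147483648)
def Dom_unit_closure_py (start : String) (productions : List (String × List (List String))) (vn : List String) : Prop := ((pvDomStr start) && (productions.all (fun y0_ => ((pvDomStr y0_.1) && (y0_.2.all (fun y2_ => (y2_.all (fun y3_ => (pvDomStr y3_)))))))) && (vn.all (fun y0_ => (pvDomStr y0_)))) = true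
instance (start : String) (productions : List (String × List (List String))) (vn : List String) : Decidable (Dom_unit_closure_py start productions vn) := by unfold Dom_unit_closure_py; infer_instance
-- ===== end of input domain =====

-- B replaces A's explicit DFS stack worklist by a chaotic fixpoint iteration
-- (sweep the whole closure until a full sweep adds nothing); objective:
-- alternative algorithm, same closure set.  Both Pythons return an UNORDERED
-- set; each port returns that set's canonical sorted representation
-- (outputs of type set are compared as finite sets, so no order is observable).

-- ===== PORT A =====
-- body of A's inner `for rhs in productions.get(head, [])` loop over state (closure, stack)
def unitStepA (vn : List String) (st : PySem.Set String × List String) (rhs : List String) :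
    PySem.Set String × List String :=
  match rhs with                                   -- `len(rhs) == 1 and rhs[0] in vn and rhs[0] not in closure`
  | [x] => if vn.contains x && !(PySem.Set.contains st.1 x)
           then (PySem.Set.add st.1 x, st.2 ++ [x])   -- closure.add(rhs[0]); stack.append(rhs[0])
           else st
  | _ => st

-- `while stack:` — fuel (vn.length + 2 bounds the number of pops) only makes it total
def unitLoopA (productions : List (String × List (List String))) (vn : List String) :
    Nat → PySem.Set String × List String → PySem.Set String
  | 0, st => st.1
  | fuel+1, st =>
    match PySem.List.pop? st.2 with                -- head = stack.pop()
    | none => st.1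
    | some (head, rest) =>
        unitLoopA productions vn fuel
          ((PySem.Dict.getD ⟨productions⟩ head []).foldl (unitStepA vn) (st.1, rest))

def unit_closure_py (start : String) (productions : List (String × List (List String))) (vn : List String) : List String :=
  PySem.List.sorted
    (unitLoopA productions vn (vn.length + 2) (PySem.Set.ofList [start], [start]))
    (fun x => x) false

-- ===== PORT B =====
-- body of B's inner `for rhs in productions.get(head, [])` loop over state (closure, changed)
def unitStepB (vn : List String) (st : PySem.Set String × Bool) (rhs : List String) :
    PySem.Set String × Bool :=
  match rhs with
  | [x] => if vn.contains x && !(PySem.Set.contains st.1 x)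
           then (PySem.Set.add st.1 x, true)          -- closure.add(rhs[0]); changed = True
           else st
  | _ => st

-- one `for head in list(closure):` sweep over the snapshot
def sweepB (productions : List (String × List (List String))) (vn : List String)
    (snapshot : List String) (st : PySem.Set String × Bool) : PySem.Set String × Bool :=
  snapshot.foldl (fun st head => (PySem.Dict.getD ⟨productions⟩ head []).foldl (unitStepB vn) st) st

-- `while changed:` — fuel (vn.length + 2 bounds the number of sweeps) only makes it total
def unitLoopB (productions : List (String × List (List String))) (vn : List String) :
    Nat → PySem.Set String → PySem.Set String
  | 0, closure => closure
  | fuel+1, closure =>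
    match sweepB productions vn closure (closure, false) with   -- changed = False; full sweep
    | (closure', true)  => unitLoopB productions vn fuel closure'
    | (closure', false) => closure'

def unit_closure_py_alt (start : String) (productions : List (String × List (List String))) (vn : List String) : List String :=
  PySem.List.sorted
    (unitLoopB productions vn (vn.length + 2) (PySem.Set.ofList [start]))
    (fun x => x) false

-- ===== PRECONDITION & SPEC =====
def Spec_unit_closure_py (start : String) (productions : List (String × List (List String))) (vn : List String) (out : List String) : Prop := out = unit_closure_py_alt start productions vn
instance (start : String) (productions : List (String × List (List String))) (vn : List String) (out : List String) : Decidable (Spec_unit_closure_py start productions vn out) := by unfold Spec_unit_closure_py; infer_instance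

-- ===== CLAIM (what is proved, stated in full; the proofs are below) =====
def Claim_equal_unit_closure_py : Prop := ∀ (start : String) (productions : List (String × List (List String))) (vn : List String), Dom_unit_closure_py start productions vn → Spec_unit_closure_py start productions vn (unit_closure_py start productions vn)

-- ===== LEMMAS AND PROOFS =====

-- `head` produces `x` by a unit production into vn, and `S` contains every such `x`
def ClosedAt (productions : List (String × List (List String))) (vn : List String)
    (h : String) (S : List String) : Prop :=
  ∀ rhs ∈ PySem.Dict.getD ⟨productions⟩ h [], ∀ x, rhs = [x] → vn.contains x = true → x ∈ S

-- S is closed under unit productions into vn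
def ClosedL (productions : List (String × List (List String))) (vn : List String)
    (S : List String) : Prop :=
  ∀ h ∈ S, ClosedAt productions vn h S

theorem closedAt_mono (productions : List (String × List (List String))) (vn : List String)
    (h : String) (S new : List String) (hc : ClosedAt productions vn h S) :
    ClosedAt productions vn h (S ++ new) := by
  intro rhs hr x hx hv
  exact List.mem_append_left _ (hc rhs hr x hx hv)

-- A's inner for-loop: the closure and the stack both grow by the same fresh suffix `new`
-- A's inner for-loop: the closure and the stack both grow by the same fresh suffix `new`
theorem foldA_spec (vn : List String) : ∀ (rhss : List (List String)) (S rest : List String),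
    S.Nodup →
    ∃ new, rhss.foldl (unitStepA vn) (S, rest) = (S ++ new, rest ++ new)
      ∧ (S ++ new).Nodup
      ∧ (∀ x ∈ new, vn.contains x = true ∧ ∃ rhs ∈ rhss, rhs = [x])
      ∧ (∀ rhs ∈ rhss, ∀ x, rhs = [x] → vn.contains x = true → x ∈ S ++ new) := by
  intro rhss
  induction rhss with
  | nil => intro S rest h; exact ⟨[], by simp, by simpa, by simp, by simp⟩
  | cons rhs t ih =>
      intro S rest hS
      rw [List.foldl_cons]
      match rhs with
      | [] =>
          obtain ⟨new, h1, h2, h3, h4⟩ := ih S rest hS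
          refine ⟨new, h1, h2, ?_, ?_⟩
          · intro x hx
            obtain ⟨hv, r, hr, he⟩ := (h3 x hx)
            exact ⟨hv, r, List.mem_cons_of_mem _ hr, he⟩
          · intro r hr x hx hv
            rcases List.mem_cons.mp hr with h | h
            · subst h; simp at hx
            · exact h4 r h x hx hv
      | y :: z :: rs =>
          obtain ⟨new, h1, h2, h3, h4⟩ := ih S rest hS
          refine ⟨new, h1, h2, ?_, ?_⟩
          · intro x hx
            obtain ⟨hv, r, hr, he⟩ := (h3 x hx)
            exact ⟨hv, r, List.mem_cons_of_mem _ hr, he⟩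
          · intro r hr x hx hv
            rcases List.mem_cons.mp hr with h | h
            · subst h; simp at hx
            · exact h4 r h x hx hv
      | [x] =>
          show ∃ new, t.foldl (unitStepA vn)
              (if vn.contains x && !(PySem.Set.contains S x)
               then (PySem.Set.add S x, rest ++ [x]) else (S, rest)) = _ ∧ _
          by_cases hc : (vn.contains x && !(PySem.Set.contains S x)) = true
          · have hx : x ∉ S := by
              have h2 := hc
              simp only [Bool.and_eq_true, Bool.not_eq_true', PySem.Set.contains,
                List.contains_eq_mem, decide_eq_false_iff_not] at h2
              exact h2.2
            have hv : vn.contains x = true := (Bool.and_eq_true ..|>.mp hc).1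
            have hadd : PySem.Set.add S x = S ++ [x] := by
              simp [PySem.Set.add, PySem.Set.contains, hx]
            rw [if_pos hc, hadd]
            have hS' : (S ++ [x]).Nodup := by
              refine List.nodup_append.mpr ⟨hS, by simp, ?_⟩
              intro a ha b hb
              simp only [List.mem_singleton] at hb
              subst hb
              exact fun he => hx (he ▸ ha)
            obtain ⟨new, h1, h2, h3, h4⟩ := ih (S ++ [x]) (rest ++ [x]) hS'
            refine ⟨x :: new, by rw [h1]; simp, by simpa using h2, ?_, ?_⟩
            · intro a ha
              rcases List.mem_cons.mp ha with h | h
              · subst h; exact ⟨hv, [a], List.mem_cons_self, rfl⟩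
              · obtain ⟨hv', r, hr, he⟩ := h3 a h
                exact ⟨hv', r, List.mem_cons_of_mem _ hr, he⟩
            · intro r hr a ha hv'
              rcases List.mem_cons.mp hr with h | h
              · subst h
                have : a = x := by simpa using ha.symm
                subst this
                simp
              · have := h4 r h a ha hv'
                simpa using this
          · rw [if_neg hc]
            obtain ⟨new, h1, h2, h3, h4⟩ := ih S rest hS
            refine ⟨new, h1, h2, ?_, ?_⟩
            · intro a ha
              obtain ⟨hv, r, hr, he⟩ := h3 a ha
              exact ⟨hv, r, List.mem_cons_of_mem _ hr, he⟩
            · intro r hr a ha hv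
              rcases List.mem_cons.mp hr with h | h
              · subst h
                have hax : a = x := by simpa using ha.symm
                subst hax
                have hmem : a ∈ S := by
                  simp only [Bool.and_eq_true, Bool.not_eq_true'] at hc
                  rcases Decidable.not_and_iff_not_or_not.mp hc with h | h
                  · exact absurd hv h
                  · have : PySem.Set.contains S a = true := by
                      simpa using h
                    simpa [PySem.Set.contains, List.contains_eq_mem] using this
                exact List.mem_append_left _ hmem
              · exact h4 r h a ha hv

-- B's inner for-loop: the closure grows by a fresh suffix `new`; `changed` records whether it is nonempty
theorem foldB_spec (vn : List String) : ∀ (rhss : List (List String)) (S : List String) (c : Bool),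
    S.Nodup →
    ∃ new, rhss.foldl (unitStepB vn) (S, c) = (S ++ new, c || !new.isEmpty)
      ∧ (S ++ new).Nodup
      ∧ (∀ x ∈ new, vn.contains x = true ∧ ∃ rhs ∈ rhss, rhs = [x])
      ∧ (∀ rhs ∈ rhss, ∀ x, rhs = [x] → vn.contains x = true → x ∈ S ++ new) := by
  intro rhss
  induction rhss with
  | nil => intro S c h; exact ⟨[], by simp, by simpa, by simp, by simp⟩
  | cons rhs t ih =>
      intro S c hS
      rw [List.foldl_cons]
      match rhs with
      | [] =>
          obtain ⟨new, h1, h2, h3, h4⟩ := ih S c hS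
          refine ⟨new, h1, h2, ?_, ?_⟩
          · intro x hx
            obtain ⟨hv, r, hr, he⟩ := (h3 x hx)
            exact ⟨hv, r, List.mem_cons_of_mem _ hr, he⟩
          · intro r hr x hx hv
            rcases List.mem_cons.mp hr with h | h
            · subst h; simp at hx
            · exact h4 r h x hx hv
      | y :: z :: rs =>
          obtain ⟨new, h1, h2, h3, h4⟩ := ih S c hS
          refine ⟨new, h1, h2, ?_, ?_⟩
          · intro x hx
            obtain ⟨hv, r, hr, he⟩ := (h3 x hx)
            exact ⟨hv, r, List.mem_cons_of_mem _ hr, he⟩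
          · intro r hr x hx hv
            rcases List.mem_cons.mp hr with h | h
            · subst h; simp at hx
            · exact h4 r h x hx hv
      | [x] =>
          show ∃ new, t.foldl (unitStepB vn)
              (if vn.contains x && !(PySem.Set.contains S x)
               then (PySem.Set.add S x, true) else (S, c)) = _ ∧ _
          by_cases hc : (vn.contains x && !(PySem.Set.contains S x)) = true
          · have hx : x ∉ S := by
              have h2 := hc
              simp only [Bool.and_eq_true, Bool.not_eq_true', PySem.Set.contains,
                List.contains_eq_mem, decide_eq_false_iff_not] at h2
              exact h2.2
            have hv : vn.contains x = true := (Bool.and_eq_true ..|>.mp hc).1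
            have hadd : PySem.Set.add S x = S ++ [x] := by
              simp [PySem.Set.add, PySem.Set.contains, hx]
            rw [if_pos hc, hadd]
            have hS' : (S ++ [x]).Nodup := by
              refine List.nodup_append.mpr ⟨hS, by simp, ?_⟩
              intro a ha b hb
              simp only [List.mem_singleton] at hb
              subst hb
              exact fun he => hx (he ▸ ha)
            obtain ⟨new, h1, h2, h3, h4⟩ := ih (S ++ [x]) true hS'
            refine ⟨x :: new, by rw [h1]; simp, by simpa using h2, ?_, ?_⟩
            · intro a ha
              rcases List.mem_cons.mp ha with h | h
              · subst h; exact ⟨hv, [a], List.mem_cons_self, rfl⟩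
              · obtain ⟨hv', r, hr, he⟩ := h3 a h
                exact ⟨hv', r, List.mem_cons_of_mem _ hr, he⟩
            · intro r hr a ha hv'
              rcases List.mem_cons.mp hr with h | h
              · subst h
                have : a = x := by simpa using ha.symm
                subst this
                simp
              · have := h4 r h a ha hv'
                simpa using this
          · rw [if_neg hc]
            obtain ⟨new, h1, h2, h3, h4⟩ := ih S c hS
            refine ⟨new, h1, h2, ?_, ?_⟩
            · intro a ha
              obtain ⟨hv, r, hr, he⟩ := h3 a ha
              exact ⟨hv, r, List.mem_cons_of_mem _ hr, he⟩
            · intro r hr a ha hv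
              rcases List.mem_cons.mp hr with h | h
              · subst h
                have hax : a = x := by simpa using ha.symm
                subst hax
                have hmem : a ∈ S := by
                  simp only [Bool.and_eq_true, Bool.not_eq_true'] at hc
                  rcases Decidable.not_and_iff_not_or_not.mp hc with h | h
                  · exact absurd hv h
                  · have : PySem.Set.contains S a = true := by
                      simpa using h
                    simpa [PySem.Set.contains, List.contains_eq_mem] using this
                exact List.mem_append_left _ hmem
              · exact h4 r h a ha hv

-- one full sweep of B
theorem sweep_spec (productions : List (String × List (List String))) (vn : List String) :
    ∀ (snapshot S : List String) (c : Bool), S.Nodup →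
    ∃ new, sweepB productions vn snapshot (S, c) = (S ++ new, c || !new.isEmpty)
      ∧ (S ++ new).Nodup
      ∧ (∀ x ∈ new, vn.contains x = true ∧
           ∃ h ∈ snapshot, ∃ rhs ∈ PySem.Dict.getD ⟨productions⟩ h [], rhs = [x])
      ∧ (new = [] → ∀ h ∈ snapshot, ClosedAt productions vn h S) := by
  intro snapshot
  induction snapshot with
  | nil => intro S c h; exact ⟨[], by simp [sweepB], by simpa, by simp, by simp⟩
  | cons hd t ih =>
      intro S c hS
      obtain ⟨new1, h1, h2, h3, h4⟩ := foldB_spec vn (PySem.Dict.getD ⟨productions⟩ hd []) S c hS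
      have hsw : sweepB productions vn (hd :: t) (S, c)
          = sweepB productions vn t (S ++ new1, c || !new1.isEmpty) := by
        simp only [sweepB, List.foldl_cons, h1]
      obtain ⟨new2, g1, g2, g3, g4⟩ := ih (S ++ new1) (c || !new1.isEmpty) h2
      refine ⟨new1 ++ new2, ?_, by simpa [List.append_assoc] using g2, ?_, ?_⟩
      · rw [hsw, g1]
        cases new1 <;> cases new2 <;> simp [List.append_assoc]
      · intro x hx
        rcases List.mem_append.mp hx with h | h
        · obtain ⟨hv, r, hr, he⟩ := h3 x h
          exact ⟨hv, hd, List.mem_cons_self, r, hr, he⟩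
        · obtain ⟨hv, hh, hht, r, hr, he⟩ := g3 x h
          exact ⟨hv, hh, List.mem_cons_of_mem _ hht, r, hr, he⟩
      · intro hnil
        have e1 : new1 = [] := by
          cases new1 with
          | nil => rfl
          | cons a b => simp at hnil
        have e2 : new2 = [] := by
          cases new2 with
          | nil => rfl
          | cons a b => rw [e1] at hnil; simp at hnil
        intro h hh
        rcases List.mem_cons.mp hh with h' | h'
        · subst h'
          intro r hr x hx hv
          have := h4 r hr x hx hv
          simpa [e1] using this
        · have := g4 e2 h h'
          intro r hr x hx hv
          have hmem := this r hr x hx hv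
          simpa [e1] using hmem

theorem pop?_concat (x : String) (xs : List String) :
    PySem.List.pop? (xs ++ [x]) = some (x, xs) := by
  have h1 : PySem.List.pyIdx? (xs.length + 1) (-1) = some xs.length := by
    simp [PySem.List.pyIdx?]
  have h2 : (xs ++ [x]).eraseIdx xs.length = xs := by
    rw [List.eraseIdx_append_of_length_le (Nat.le_refl _)]; simp
  simp [PySem.List.pop?, h1, h2]

-- A's worklist loop computes the least closed superset of its closure, given enough fuel
theorem A_main (productions : List (String × List (List String))) (vn : List String)
    (start : String) : ∀ (fuel : Nat) (S stack : List String),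
    S.Nodup → (∀ x ∈ S, x ∈ start :: vn) → (∀ x ∈ stack, x ∈ S) →
    (∀ h ∈ S, h ∉ stack → ClosedAt productions vn h S) →
    stack.length + (vn.length + 1) ≤ fuel + S.length →
    (unitLoopA productions vn fuel (S, stack)).Nodup
    ∧ (∀ x ∈ S, x ∈ unitLoopA productions vn fuel (S, stack))
    ∧ ClosedL productions vn (unitLoopA productions vn fuel (S, stack))
    ∧ ∀ T, ClosedL productions vn T → (∀ x ∈ S, x ∈ T) →
        ∀ x ∈ unitLoopA productions vn fuel (S, stack), x ∈ T := by
  intro fuel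
  induction fuel with
  | zero =>
      intro S stack hS hU hst hcl hm
      have hlen : S.length ≤ vn.length + 1 := by
        have := (List.subperm_of_subset hS hU).length_le
        simpa using this
      have hstack : stack = [] := by
        have : stack.length = 0 := by omega
        exact List.length_eq_zero_iff.mp this
      subst hstack
      refine ⟨hS, fun x hx => hx, ?_, fun T _ hT x hx => hT x hx⟩
      intro h hh
      exact hcl h hh (by simp)
  | succ n ih =>
      intro S stack hS hU hst hcl hm
      rcases List.eq_nil_or_concat stack with hnil | ⟨rest, hd, hcat⟩
      · subst hnil
        rw [show unitLoopA productions vn (n+1) (S, []) = S from by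
              simp [unitLoopA, PySem.List.pop?, PySem.List.pyIdx?]]
        refine ⟨hS, fun x hx => hx, ?_, fun T _ hT x hx => hT x hx⟩
        intro h hh
        exact hcl h hh (by simp)
      · rw [List.concat_eq_append] at hcat
        subst hcat
        have hhd : hd ∈ S := hst hd (by simp)
        obtain ⟨new, h1, h2, h3, h4⟩ := foldA_spec vn (PySem.Dict.getD ⟨productions⟩ hd []) S rest hS
        have hstep : unitLoopA productions vn (n+1) (S, rest ++ [hd])
            = unitLoopA productions vn n (S ++ new, rest ++ new) := by
          rw [unitLoopA]
          rw [show PySem.List.pop? (rest ++ [hd]) = some (hd, rest) from pop?_concat hd rest]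
          dsimp only
          rw [h1]
        rw [hstep]
        have hnewlen : S.length + new.length ≤ vn.length + 1 := by
          have hsub : ∀ x ∈ S ++ new, x ∈ start :: vn := by
            intro x hx
            rcases List.mem_append.mp hx with h | h
            · exact hU x h
            · have hv := (h3 x h).1
              have : x ∈ vn := by
                simpa [List.contains_eq_mem] using hv
              exact List.mem_cons_of_mem _ this
          have := (List.subperm_of_subset h2 hsub).length_le
          simpa using this
        have hm' : (rest ++ new).length + (vn.length + 1) ≤ n + (S ++ new).length := by
          simp only [List.length_append] at hm ⊢
          simp only [List.length_cons, List.length_nil] at hm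
          omega
        have hU' : ∀ x ∈ S ++ new, x ∈ start :: vn := by
          intro x hx
          rcases List.mem_append.mp hx with h | h
          · exact hU x h
          · have hv := (h3 x h).1
            have : x ∈ vn := by simpa [List.contains_eq_mem] using hv
            exact List.mem_cons_of_mem _ this
        have hst' : ∀ x ∈ rest ++ new, x ∈ S ++ new := by
          intro x hx
          rcases List.mem_append.mp hx with h | h
          · exact List.mem_append_left _ (hst x (List.mem_append_left _ h))
          · exact List.mem_append_right _ h
        have hcl' : ∀ h ∈ S ++ new, h ∉ rest ++ new → ClosedAt productions vn h (S ++ new) := by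
          intro h hh hnst
          rcases List.mem_append.mp hh with hhS | hhnew
          · by_cases hhd' : h = hd
            · subst hhd'
              intro r hr x hx hv
              exact h4 r hr x hx hv
            · have : h ∉ rest ++ [hd] := by
                intro hmem
                rcases List.mem_append.mp hmem with h' | h'
                · exact hnst (List.mem_append_left _ h')
                · simp only [List.mem_singleton] at h'
                  exact hhd' h'
              exact closedAt_mono productions vn h S new (hcl h hhS this)
          · exact absurd (List.mem_append_right _ hhnew) hnst
        obtain ⟨g1, g2, g3, g4⟩ := ih (S ++ new) (rest ++ new) h2 hU' hst' hcl' hm'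
        refine ⟨g1, ?_, g3, ?_⟩
        · intro x hx
          exact g2 x (List.mem_append_left _ hx)
        · intro T hTcl hTsub x hx
          refine g4 T hTcl ?_ x hx
          intro a ha
          rcases List.mem_append.mp ha with h | h
          · exact hTsub a h
          · obtain ⟨hv, r, hr, he⟩ := h3 a h
            have hhdT : hd ∈ T := hTsub hd hhd
            exact hTcl hd hhdT r hr a he hv

-- B's fixpoint loop computes the least closed superset of its closure, given enough fuel
theorem B_main (productions : List (String × List (List String))) (vn : List String)
    (start : String) : ∀ (fuel : Nat) (closure : List String),
    closure.Nodup → (∀ x ∈ closure, x ∈ start :: vn) →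
    vn.length + 1 < fuel + closure.length →
    (unitLoopB productions vn fuel closure).Nodup
    ∧ (∀ x ∈ closure, x ∈ unitLoopB productions vn fuel closure)
    ∧ ClosedL productions vn (unitLoopB productions vn fuel closure)
    ∧ ∀ T, ClosedL productions vn T → (∀ x ∈ closure, x ∈ T) →
        ∀ x ∈ unitLoopB productions vn fuel closure, x ∈ T := by
  intro fuel
  induction fuel with
  | zero =>
      intro closure hN hU hm
      have hlen : closure.length ≤ vn.length + 1 := by
        have := (List.subperm_of_subset hN hU).length_le
        simpa using this
      omega
  | succ n ih =>
      intro closure hN hU hm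
      obtain ⟨new, h1, h2, h3, h4⟩ := sweep_spec productions vn closure closure false hN
      have hU' : ∀ x ∈ closure ++ new, x ∈ start :: vn := by
        intro x hx
        rcases List.mem_append.mp hx with h | h
        · exact hU x h
        · have hv := (h3 x h).1
          have : x ∈ vn := by simpa [List.contains_eq_mem] using hv
          exact List.mem_cons_of_mem _ this
      cases hne : new with
      | nil =>
          have hstep : unitLoopB productions vn (n+1) closure = closure := by
            rw [unitLoopB]
            rw [show sweepB productions vn closure (closure, false) = (closure, false) from by
                  rw [h1, hne]; simp]
          rw [hstep]
          refine ⟨hN, fun x hx => hx, ?_, fun T _ hT x hx => hT x hx⟩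
          intro h hh
          exact h4 hne h hh
      | cons a b =>
          have hstep : unitLoopB productions vn (n+1) closure
              = unitLoopB productions vn n (closure ++ new) := by
            rw [unitLoopB]
            rw [show sweepB productions vn closure (closure, false) = (closure ++ new, true) from by
                  rw [h1, hne]; simp]
          rw [hstep]
          have hlen : (closure ++ new).length ≤ vn.length + 1 := by
            have := (List.subperm_of_subset h2 hU').length_le
            simpa using this
          have hm' : vn.length + 1 < n + (closure ++ new).length := by
            have : 1 ≤ new.length := by rw [hne]; simp
            simp only [List.length_append] at hlen ⊢
            omega
          obtain ⟨g1, g2, g3, g4⟩ := ih (closure ++ new) h2 hU' hm'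
          refine ⟨g1, ?_, g3, ?_⟩
          · intro x hx
            exact g2 x (List.mem_append_left _ hx)
          · intro T hTcl hTsub x hx
            refine g4 T hTcl ?_ x hx
            intro c hc
            rcases List.mem_append.mp hc with h | h
            · exact hTsub c h
            · obtain ⟨hv, hh, hhc, r, hr, he⟩ := h3 c h
              exact hTcl hh (hTsub hh hhc) r hr c he hv

theorem ofList_singleton (s : String) : PySem.Set.ofList [s] = [s] := by
  simp [PySem.Set.ofList, PySem.Set.add, PySem.Set.contains, PySem.Set.empty]

-- ===== VERDICT (by name: the statement is the Claim_ definition above) =====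
theorem unit_closure_py_spec : Claim_equal_unit_closure_py := by
  intro start productions vn _
  unfold Spec_unit_closure_py unit_closure_py unit_closure_py_alt
  rw [ofList_singleton]
  have hA := A_main productions vn start (vn.length + 2) [start] [start]
    (by simp) (by intro x hx; simp at hx; simp [hx]) (by intro x hx; exact hx)
    (by intro h hh hn; exact absurd hh hn)
    (by simp; omega)
  have hB := B_main productions vn start (vn.length + 2) [start]
    (by simp) (by intro x hx; simp at hx; simp [hx]) (by simp)
  obtain ⟨aN, aIn, aCl, aMin⟩ := hA
  obtain ⟨bN, bIn, bCl, bMin⟩ := hB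
  have hperm : (unitLoopA productions vn (vn.length + 2) ([start], [start])).Perm
      (unitLoopB productions vn (vn.length + 2) [start]) := by
    rw [List.perm_ext_iff_of_nodup aN bN]
    intro a
    constructor
    · intro ha
      exact aMin _ bCl (by intro x hx; simp at hx; subst hx; exact bIn x (by simp)) a ha
    · intro ha
      exact bMin _ aCl (by intro x hx; simp at hx; subst hx; exact aIn x (by simp)) a ha
  exact (PySem.List.sorted_id_eq_sorted_id_iff_perm _ _).mpr hperm
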